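-- pv_equiv track=rewrite | github.com/geraly/advent-of-code | 2020/Day 21 Allergen Assessment/solve1.py | search_non_allergen
-- ===== SOURCE A (Python) =====
-- INGREDIENT = "ingredient"
--
-- ALLERGEN = "allergen"
--
-- def get_all_ingredients(list_):
--     ret = set()
--
--     for item_ in list_:
--         ret |= set(item_[INGREDIENT])
--
--     return ret
--
-- def search_non_allergen(list_):
--     # アレルゲンごとに候補の成分を探す
--     # アレルゲンが記載されているメニューには必ず共通の成分がある
--     allergen_candidate = {}
--
--     for item_ in list_:
--         for allergen in item_[ALLERGEN]:
--             if allergen not in allergen_candidate: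
--                 allergen_candidate[allergen] = set(item_[INGREDIENT])
--                 continue
--             allergen_candidate[allergen] &= set(item_[INGREDIENT])
--
--     candidate = set()
--     for ingredients in allergen_candidate.values():
--         candidate |= ingredients
--
--     all_ingredients = get_all_ingredients(list_)
--     ret = all_ingredients
--     for ingredient in candidate:
--         ret.remove(ingredient)
--
--     return ret
-- ===== SOURCE B (Python) =====
-- INGREDIENT = "ingredient"
--
-- ALLERGEN = "allergen"
--
--
-- def search_non_allergen(list_):
--     # Per-ingredient test, no intersection sets and no per-allergen dict:
--     # an ingredient may carry an allergen only if it appears in EVERY menu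
--     # listing that allergen; it is allergen-free iff no allergen may be in it.
--     allergens = {a for item_ in list_ for a in item_[ALLERGEN]}
--     all_ingredients = {i for item_ in list_ for i in item_[INGREDIENT]}
--
--     def may_carry(ingredient, allergen):
--         return all(ingredient in item_[INGREDIENT]
--                    for item_ in list_ if allergen in item_[ALLERGEN])
--
--     return {i for i in all_ingredients
--             if not any(may_carry(i, a) for a in allergens)}
-- ===== Notes on version B (the rewrite author's own statement) =====
-- stated objective: alternative
-- what changed: B replaces A's per-allergen intersection-set machinery (a dict of incrementally intersected ingredient sets, a union pass and element-wise remove) with a direct per-ingredient quantifier test: an ingredient is returned iff for no allergen it occurs in every menu listing that allergen; no intersections, unions or dict are built.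
import Mathlib
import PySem

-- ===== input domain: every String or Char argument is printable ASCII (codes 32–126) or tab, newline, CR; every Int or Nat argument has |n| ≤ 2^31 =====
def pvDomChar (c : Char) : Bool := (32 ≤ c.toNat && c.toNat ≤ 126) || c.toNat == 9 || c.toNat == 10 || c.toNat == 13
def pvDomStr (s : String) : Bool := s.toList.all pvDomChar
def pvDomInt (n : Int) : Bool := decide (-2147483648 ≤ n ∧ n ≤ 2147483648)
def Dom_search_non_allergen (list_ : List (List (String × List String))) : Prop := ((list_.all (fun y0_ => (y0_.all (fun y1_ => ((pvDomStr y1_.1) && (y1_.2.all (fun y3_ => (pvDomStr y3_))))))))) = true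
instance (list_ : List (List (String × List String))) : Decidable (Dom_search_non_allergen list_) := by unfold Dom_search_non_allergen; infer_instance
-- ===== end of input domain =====

-- B drops A's per-allergen intersection sets entirely and instead tests each ingredient directly:
-- it is returned iff no allergen occurs such that the ingredient is in every menu listing that
-- allergen (objective: alternative; same result, different algorithm).

-- ===== PORT A =====

-- item_[k]: dict lookup; exact under Pre_ (the key is present, so Python's KeyError cannot fire)
def pyItemGet (item_ : List (String × List String)) (k : String) : List String :=
  (PySem.Dict.mk item_).getD k []

def get_all_ingredients (list_ : List (List (String × List String))) : PySem.Set String :=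
  list_.foldl
    (fun ret item_ => PySem.Set.union ret (PySem.Set.ofList (pyItemGet item_ "ingredient")))
    PySem.Set.empty

def search_non_allergen (list_ : List (List (String × List String))) : List String :=
  let allergen_candidate : PySem.Dict String (PySem.Set String) :=
    list_.foldl (fun d item_ =>
      (pyItemGet item_ "allergen").foldl (fun d allergen =>
        if d.contains allergen = false then
          d.insert allergen (PySem.Set.ofList (pyItemGet item_ "ingredient"))
        else
          d.insert allergen (PySem.Set.inter (d.getD allergen PySem.Set.empty)
            (PySem.Set.ofList (pyItemGet item_ "ingredient"))))
        d) PySem.Dict.empty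
  let candidate : PySem.Set String :=
    allergen_candidate.values.foldl
      (fun c ingredients => PySem.Set.union c ingredients) PySem.Set.empty
  let all_ingredients := get_all_ingredients list_
  -- ret.remove(ingredient): every element of candidate is in ret (an intersection of ingredient
  -- sets lies inside the union of all ingredient sets, and candidate has no duplicates), so
  -- Python's set.remove never raises here and equals Set.discard
  candidate.foldl (fun ret ingredient => PySem.Set.discard ret ingredient) all_ingredients

-- ===== PORT B =====

-- the two set comprehensions over the nested lists
def allAllergens (list_ : List (List (String × List String))) : PySem.Set String :=
  list_.foldl (fun s item_ => (pyItemGet item_ "allergen").foldl PySem.Set.add s)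
    PySem.Set.empty

def allIngredients (list_ : List (List (String × List String))) : PySem.Set String :=
  list_.foldl (fun s item_ => (pyItemGet item_ "ingredient").foldl PySem.Set.add s)
    PySem.Set.empty

-- all(ingredient in item_[INGREDIENT] for item_ in list_ if allergen in item_[ALLERGEN])
def may_carry (list_ : List (List (String × List String))) (ingredient allergen : String) : Bool :=
  list_.all (fun item_ =>
    !((pyItemGet item_ "allergen").contains allergen)
      || (pyItemGet item_ "ingredient").contains ingredient)

def search_non_allergen_alt (list_ : List (List (String × List String))) : List String :=
  let allergens := allAllergens list_
  let all_ingredients := allIngredients list_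
  -- the final set comprehension filters the duplicate-free all_ingredients, so it IS a filter
  all_ingredients.filter (fun i => !(allergens.any (fun a => may_carry list_ i a)))

-- ===== PRECONDITION & SPEC =====

-- Pre_ excludes exactly the items missing an "ingredient" or "allergen" key, on which the Python
-- raises KeyError (item_[INGREDIENT] / item_[ALLERGEN]).
def Pre_search_non_allergen (list_ : List (List (String × List String))) : Prop :=
  ∀ item_ ∈ list_, (PySem.Dict.mk item_).contains "ingredient" = true ∧
    (PySem.Dict.mk item_).contains "allergen" = true

instance (list_ : List (List (String × List String))) : Decidable (Pre_search_non_allergen list_) := by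
  unfold Pre_search_non_allergen; infer_instance

def pvWitness_search_non_allergen : (List (List (String × List String))) :=
  [[("ingredient", ["mxmxvkd", "kfcds"]), ("allergen", ["dairy"])],
   [("ingredient", ["mxmxvkd", "sqjhc"]), ("allergen", ["dairy"])]]

def Spec_search_non_allergen (list_ : List (List (String × List String))) (out : List String) : Prop := out = search_non_allergen_alt list_
instance (list_ : List (List (String × List String))) (out : List String) : Decidable (Spec_search_non_allergen list_ out) := by unfold Spec_search_non_allergen; infer_instance

-- ===== CLAIM (what is proved, stated in full; the proofs are below) =====
def Claim_equal_search_non_allergen : Prop := ∀ (list_ : List (List (String × List String))), Dom_search_non_allergen list_ → Pre_search_non_allergen list_ → Spec_search_non_allergen list_ (search_non_allergen list_)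

-- ===== LEMMAS AND PROOFS =====

-- abbreviations for the two fields of an item
def algOf (item_ : List (String × List String)) : List String := pyItemGet item_ "allergen"
def ingOf (item_ : List (String × List String)) : List String := pyItemGet item_ "ingredient"

-- "some processed menu lists allergen a"
def Cp (l : List (List (String × List String))) (a : String) : Prop :=
  ∃ item_ ∈ l, a ∈ algOf item_

-- "x occurs in every processed menu listing allergen a"
def Pp (l : List (List (String × List String))) (a x : String) : Prop :=
  ∀ item_ ∈ l, a ∈ algOf item_ → x ∈ ingOf item_

-- invariant of A's dict after processing the menus of l
def InvD (d : PySem.Dict String (PySem.Set String))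
    (l : List (List (String × List String))) : Prop :=
  d.keys.Nodup ∧ (∀ a, d.contains a = true ↔ Cp l a) ∧
    (∀ a x, x ∈ d.getD a PySem.Set.empty ↔ Cp l a ∧ Pp l a x)

-- mid-item invariant: the allergens pr of the current menu (ingredient set I) are processed
def InvM (d : PySem.Dict String (PySem.Set String))
    (l : List (List (String × List String))) (pr : List String) (I : PySem.Set String) : Prop :=
  d.keys.Nodup ∧ (∀ a, d.contains a = true ↔ Cp l a ∨ a ∈ pr) ∧
    (∀ a x, x ∈ d.getD a PySem.Set.empty ↔
      if a ∈ pr then Pp l a x ∧ x ∈ I else Cp l a ∧ Pp l a x)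

lemma pp_of_not_cp {l : List (List (String × List String))} {a x : String}
    (h : ¬ Cp l a) : Pp l a x := by
  intro it hit ha
  exact absurd ⟨it, hit, ha⟩ h

lemma invM_step {d : PySem.Dict String (PySem.Set String)}
    {l : List (List (String × List String))} {pr : List String} {I : PySem.Set String}
    (h : InvM d l pr I) (a0 : String) :
    InvM (if d.contains a0 = false then d.insert a0 I
          else d.insert a0 (PySem.Set.inter (d.getD a0 PySem.Set.empty) I))
      l (pr ++ [a0]) I := by
  obtain ⟨hnd, hc, hv⟩ := h
  by_cases hca : d.contains a0 = true
  · rw [if_neg (by simp [hca])]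
    refine ⟨PySem.Dict.nodup_keys_insert _ _ _ hnd, ?_, ?_⟩
    · intro a
      rw [PySem.Dict.contains_insert]
      by_cases hea : a = a0 <;> simp [hea, hc]
    · intro a x
      by_cases hea : a = a0
      · subst hea
        rw [PySem.Dict.getD_insert_self]
        rw [PySem.Set.mem_inter, hv a x]
        by_cases hpr : a ∈ pr
        · simp only [hpr, if_true, List.mem_append, List.mem_singleton, true_or]
          tauto
        · have hcp : Cp l a := by
            have := (hc a).mp hca
            tauto
          simp only [hpr, List.mem_append, List.mem_singleton, or_true, if_true, if_false]
          tauto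
      · rw [PySem.Dict.getD_insert_of_ne _ _ _ hea]
        rw [hv a x]
        have h2 : (a ∈ pr ++ [a0]) ↔ a ∈ pr := by simp [hea]
        by_cases hpr : a ∈ pr <;> simp [hpr, h2]
  · rw [if_pos (by simpa using hca)]
    have hncp : ¬ (Cp l a0 ∨ a0 ∈ pr) := fun h' => hca ((hc a0).mpr h')
    refine ⟨PySem.Dict.nodup_keys_insert _ _ _ hnd, ?_, ?_⟩
    · intro a
      rw [PySem.Dict.contains_insert]
      by_cases hea : a = a0 <;> simp [hea, hc]
    · intro a x
      by_cases hea : a = a0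
      · subst hea
        rw [PySem.Dict.getD_insert_self]
        have hpr : a ∉ pr := fun h' => hncp (Or.inr h')
        have hcp : ¬ Cp l a := fun h' => hncp (Or.inl h')
        simp only [List.mem_append, List.mem_singleton, or_true, if_true]
        exact ⟨fun hx => ⟨pp_of_not_cp hcp, hx⟩, fun hx => hx.2⟩
      · rw [PySem.Dict.getD_insert_of_ne _ _ _ hea]
        rw [hv a x]
        have h2 : (a ∈ pr ++ [a0]) ↔ a ∈ pr := by simp [hea]
        by_cases hpr : a ∈ pr <;> simp [hpr, h2]

lemma invM_fold {l : List (List (String × List String))} {I : PySem.Set String} :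
    ∀ (as_ : List String) (pr : List String) (d : PySem.Dict String (PySem.Set String)),
      InvM d l pr I →
      InvM (as_.foldl (fun d allergen =>
              if d.contains allergen = false then d.insert allergen I
              else d.insert allergen (PySem.Set.inter (d.getD allergen PySem.Set.empty) I))
           d) l (pr ++ as_) I := by
  intro as_
  induction as_ with
  | nil => intro pr d h; simpa using h
  | cons a rest ih =>
    intro pr d h
    have := ih (pr ++ [a]) _ (invM_step h a)
    simpa using this

lemma invD_item {d : PySem.Dict String (PySem.Set String)}
    {l : List (List (String × List String))} (h : InvD d l)
    (item_ : List (String × List String)) :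
    InvD ((algOf item_).foldl (fun d allergen =>
        if d.contains allergen = false then
          d.insert allergen (PySem.Set.ofList (ingOf item_))
        else
          d.insert allergen (PySem.Set.inter (d.getD allergen PySem.Set.empty)
            (PySem.Set.ofList (ingOf item_)))) d)
      (l ++ [item_]) := by
  obtain ⟨hnd, hc, hv⟩ := h
  have h0 : InvM d l [] (PySem.Set.ofList (ingOf item_)) := by
    refine ⟨hnd, fun a => by simpa using hc a, fun a x => by simpa using hv a x⟩
  have hend := invM_fold (algOf item_) [] d h0
  simp only [List.nil_append] at hend
  obtain ⟨hnd', hc', hv'⟩ := hend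
  have hCp : ∀ a, Cp (l ++ [item_]) a ↔ Cp l a ∨ a ∈ algOf item_ := by
    intro a; unfold Cp
    simp only [List.mem_append, List.mem_singleton]
    constructor
    · rintro ⟨it, hmem | rfl, ha⟩
      · exact Or.inl ⟨it, hmem, ha⟩
      · exact Or.inr ha
    · rintro (⟨it, hmem, ha⟩ | ha)
      · exact ⟨it, Or.inl hmem, ha⟩
      · exact ⟨item_, Or.inr rfl, ha⟩
  have hPp : ∀ a x, Pp (l ++ [item_]) a x ↔ Pp l a x ∧ (a ∈ algOf item_ → x ∈ ingOf item_) := by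
    intro a x; unfold Pp
    simp only [List.mem_append, List.mem_singleton]
    constructor
    · intro h
      exact ⟨fun it hit ha => h it (Or.inl hit) ha, fun ha => h item_ (Or.inr rfl) ha⟩
    · rintro ⟨h1, h2⟩ it (hit | rfl) ha
      · exact h1 it hit ha
      · exact h2 ha
  refine ⟨hnd', fun a => by rw [hc' a, hCp a], ?_⟩
  intro a x
  rw [hv' a x, hCp a, hPp a x]
  by_cases hpr : a ∈ algOf item_
  · rw [if_pos hpr]
    rw [PySem.Set.mem_ofList]
    constructor
    · rintro ⟨hp, hi⟩
      by_cases hcp : Cp l a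
      · exact ⟨Or.inl hcp, hp, fun _ => hi⟩
      · exact ⟨Or.inr hpr, pp_of_not_cp hcp, fun _ => hi⟩
    · rintro ⟨_, hp, hi⟩
      exact ⟨hp, hi hpr⟩
  · rw [if_neg hpr]
    tauto

lemma invD_list (list_ : List (List (String × List String))) :
    InvD (list_.foldl (fun d item_ =>
        (algOf item_).foldl (fun d allergen =>
          if d.contains allergen = false then
            d.insert allergen (PySem.Set.ofList (ingOf item_))
          else
            d.insert allergen (PySem.Set.inter (d.getD allergen PySem.Set.empty)
              (PySem.Set.ofList (ingOf item_)))) d) PySem.Dict.empty)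
      list_ := by
  suffices h : ∀ (l2 : List (List (String × List String)))
      (d : PySem.Dict String (PySem.Set String)) (l1 : List (List (String × List String))),
      InvD d l1 →
      InvD (l2.foldl (fun d item_ =>
        (algOf item_).foldl (fun d allergen =>
          if d.contains allergen = false then
            d.insert allergen (PySem.Set.ofList (ingOf item_))
          else
            d.insert allergen (PySem.Set.inter (d.getD allergen PySem.Set.empty)
              (PySem.Set.ofList (ingOf item_)))) d) d) (l1 ++ l2) by
    have h0 : InvD PySem.Dict.empty [] := by
      refine ⟨by simp [PySem.Dict.keys, PySem.Dict.empty], ?_, ?_⟩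
      · intro a
        simp [PySem.Dict.contains_empty, Cp]
      · intro a x
        simp [PySem.Dict.getD_empty, PySem.Set.empty, Cp]
    simpa using h list_ PySem.Dict.empty [] h0
  intro l2
  induction l2 with
  | nil => intro d l1 h; simpa using h
  | cons it rest ih =>
    intro d l1 h
    have := ih _ (l1 ++ [it]) (invD_item h it)
    simpa using this

-- membership in the union of a list of sets built by a foldl of Set.union
lemma mem_foldl_union (x : String) :
    ∀ (vs : List (PySem.Set String)) (s : PySem.Set String),
      x ∈ vs.foldl (fun c v => PySem.Set.union c v) s ↔ x ∈ s ∨ ∃ v ∈ vs, x ∈ v := by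
  intro vs
  induction vs with
  | nil => intro s; simp
  | cons v rest ih =>
    intro s
    rw [List.foldl_cons, ih]
    rw [PySem.Set.mem_union]
    simp; tauto

-- membership in B's allergen set
lemma mem_allAllergens (x : String) (list_ : List (List (String × List String))) :
    x ∈ allAllergens list_ ↔ ∃ item_ ∈ list_, x ∈ algOf item_ := by
  unfold allAllergens
  suffices h : ∀ (l : List (List (String × List String))) (s : PySem.Set String),
      x ∈ l.foldl (fun s item_ => (pyItemGet item_ "allergen").foldl PySem.Set.add s) s ↔
        x ∈ s ∨ ∃ item_ ∈ l, x ∈ algOf item_ by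
    rw [h list_ PySem.Set.empty]
    simp [PySem.Set.empty]
  intro l
  induction l with
  | nil => intro s; simp
  | cons it rest ih =>
    intro s
    rw [List.foldl_cons, ih]
    have : x ∈ (pyItemGet it "allergen").foldl PySem.Set.add s ↔ x ∈ s ∨ x ∈ algOf it := by
      have := PySem.Set.mem_foldl_add (l := pyItemGet it "allergen") (f := fun b => b)
        (s := s) (y := x)
      simpa [algOf] using this
    rw [this]
    simp; tauto

-- A's all-ingredients fold equals B's element-wise fold (union with ofList = update)
lemma all_ingredients_eq (list_ : List (List (String × List String))) :
    get_all_ingredients list_ = allIngredients list_ := by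
  unfold get_all_ingredients allIngredients
  suffices h : ∀ (l : List (List (String × List String))) (s : PySem.Set String),
      l.foldl (fun ret item_ =>
        PySem.Set.union ret (PySem.Set.ofList (pyItemGet item_ "ingredient"))) s =
      l.foldl (fun s item_ => (pyItemGet item_ "ingredient").foldl PySem.Set.add s) s from
    h list_ PySem.Set.empty
  intro l
  induction l with
  | nil => intro s; rfl
  | cons it rest ih =>
    intro s
    rw [List.foldl_cons, List.foldl_cons, ← ih]
    congr 1
    unfold PySem.Set.union
    rw [PySem.Set.update_eq_append_filter, PySem.Set.ofList_ofList,
      ← PySem.Set.update_eq_append_filter]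
    rfl

-- Python's 'for x in candidate: ret.remove(x)' = set difference = filter
lemma foldl_discard_eq_diff (t : List String) :
    ∀ s : List String, t.foldl (fun ret x => PySem.Set.discard ret x) s = PySem.Set.diff s t := by
  induction t with
  | nil => intro s; simp [PySem.Set.diff, PySem.Set.contains]
  | cons x t' ih =>
    intro s
    simp only [List.foldl_cons, ih]
    simp only [PySem.Set.diff, PySem.Set.discard, List.filter_filter]
    refine List.filter_congr fun y _ => ?_
    by_cases h1 : y = x <;> by_cases h2 : y ∈ t' <;> simp [h1, h2]

-- may_carry = Pp, as a Prop
lemma may_carry_iff (list_ : List (List (String × List String))) (i a : String) :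
    may_carry list_ i a = true ↔ Pp list_ a i := by
  unfold may_carry Pp algOf ingOf
  simp only [List.all_eq_true, Bool.or_eq_true, Bool.not_eq_true', List.contains_eq_mem,
    decide_eq_true_eq, decide_eq_false_iff_not]
  constructor
  · intro h it hit ha
    rcases h it hit with h' | h'
    · exact absurd ha h'
    · exact h'
  · intro h it hit
    by_cases ha : a ∈ pyItemGet it "allergen"
    · exact Or.inr (h it hit ha)
    · exact Or.inl ha

-- membership in the union of A's candidate values, through the invariant
lemma candidate_iff {d : PySem.Dict String (PySem.Set String)}
    {list_ : List (List (String × List String))} (h : InvD d list_) (x : String) :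
    x ∈ d.values.foldl (fun c v => PySem.Set.union c v) PySem.Set.empty ↔
      ∃ a, Cp list_ a ∧ Pp list_ a x := by
  obtain ⟨hnd, hc, hv⟩ := h
  rw [mem_foldl_union]
  simp only [PySem.Set.empty, List.not_mem_nil, false_or]
  constructor
  · rintro ⟨v, hvmem, hxv⟩
    unfold PySem.Dict.values at hvmem
    obtain ⟨p, hpmem, hpv⟩ := List.mem_map.mp hvmem
    have hgd := PySem.Dict.getD_of_mem_items d (k := p.1) (v := p.2)
      (by simpa using hpmem) hnd PySem.Set.empty
    have hx : x ∈ d.getD p.1 PySem.Set.empty := by rw [hgd, hpv]; exact hxv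
    exact ⟨p.1, (hv p.1 x).mp hx⟩
  · rintro ⟨a, hcp, hpp⟩
    have hx : x ∈ d.getD a PySem.Set.empty := (hv a x).mpr ⟨hcp, hpp⟩
    have hcon : d.contains a = true := (hc a).mpr hcp
    rw [PySem.Dict.contains_iff_mem_keys] at hcon
    obtain ⟨v, hpv'⟩ : ∃ v, (a, v) ∈ d.items := by simpa [PySem.Dict.keys] using hcon
    have hgd := PySem.Dict.getD_of_mem_items d hpv' hnd PySem.Set.empty
    refine ⟨v, ?_, by rw [← hgd]; exact hx⟩
    unfold PySem.Dict.values
    exact List.mem_map.mpr ⟨(a, v), hpv', rfl⟩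

lemma algOf_eq (item_ : List (String × List String)) :
    pyItemGet item_ "allergen" = algOf item_ := rfl
lemma ingOf_eq (item_ : List (String × List String)) :
    pyItemGet item_ "ingredient" = ingOf item_ := rfl

theorem search_non_allergen_spec : Claim_equal_search_non_allergen := by
  intro list_ _ _
  unfold Spec_search_non_allergen search_non_allergen search_non_allergen_alt
  rw [foldl_discard_eq_diff, all_ingredients_eq]
  unfold PySem.Set.diff
  refine List.filter_congr fun x _ => ?_
  congr 1
  rw [Bool.eq_iff_iff, PySem.Set.contains_iff]
  simp only [algOf_eq, ingOf_eq]
  rw [candidate_iff (invD_list list_) x]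
  simp only [List.any_eq_true]
  constructor
  · rintro ⟨a, hcp, hpp⟩
    obtain ⟨it, hit, ha⟩ := hcp
    refine ⟨a, (mem_allAllergens a list_).mpr ⟨it, hit, ha⟩, ?_⟩
    exact (may_carry_iff list_ x a).mpr hpp
  · rintro ⟨a, ha, hmc⟩
    obtain ⟨it, hit, hamem⟩ := (mem_allAllergens a list_).mp ha
    exact ⟨a, ⟨it, hit, hamem⟩, (may_carry_iff list_ x a).mp hmc⟩
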